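-- pv_equiv track=rewrite | github.com/mpsijben/Lion | src/lion/cli/autocomplete.py | _rank_matches
-- ===== SOURCE A (Python) =====
-- from typing import Iterable
--
-- def _is_fuzzy_match(query: str, candidate: str) -> bool:
--     """Check if query characters appear in order within candidate."""
--     if not query:
--         return True
--     it = iter(candidate)
--     return all(ch in it for ch in query)
--
-- def _rank_matches(prefix: str, choices: Iterable[str], show_all_on_empty: bool = True) -> list[str]:
--     """Return prefix matches first, then fuzzy matches.
--
--     Args:
--         prefix: The text to match against
--         choices: Available options to match
--         show_all_on_empty: If True, return all choices when prefix is empty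
--     """
--     prefix = prefix.lower()
--     choices_list = list(choices)
--
--     if not prefix and show_all_on_empty:
--         return choices_list
--
--     prefix_matches = [c for c in choices_list if c.lower().startswith(prefix)]
--     fuzzy_matches = [c for c in choices_list if c not in prefix_matches and _is_fuzzy_match(prefix, c.lower())]
--     return prefix_matches + fuzzy_matches
-- ===== SOURCE B (Python) =====
-- def _is_subseq(query: str, candidate: str) -> bool:
--     """True iff query's characters occur in order in candidate (index jumps via str.find)."""
--     pos = 0
--     for ch in query:
--         pos = candidate.find(ch, pos) + 1
--         if pos == 0:
--             return False
--     return True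
--
--
-- def _rank_matches(prefix, choices, show_all_on_empty=True):
--     prefix = prefix.lower()
--     choices_list = list(choices)
--
--     if not prefix and show_all_on_empty:
--         return choices_list
--
--     matches = [c for c in choices_list if _is_subseq(prefix, c.lower())]
--     return sorted(matches, key=lambda c: 0 if c.lower().startswith(prefix) else 1)
-- ===== Notes on version B (the rewrite author's own statement) =====
-- stated objective: faster
-- what changed: Replaces A's two staged comprehensions (the second re-scanning prefix_matches with an O(n) 'not in' membership test per element) by a single subsequence filter followed by a stable sort on a 0/1 key (prefix match first), relying on the fact that every prefix match is a subsequence match and that stable sorting by the boolean key reproduces A's prefix-then-fuzzy order; the fuzzy helper jumps through the candidate with str.find instead of consuming a character iterator.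
import Mathlib
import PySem

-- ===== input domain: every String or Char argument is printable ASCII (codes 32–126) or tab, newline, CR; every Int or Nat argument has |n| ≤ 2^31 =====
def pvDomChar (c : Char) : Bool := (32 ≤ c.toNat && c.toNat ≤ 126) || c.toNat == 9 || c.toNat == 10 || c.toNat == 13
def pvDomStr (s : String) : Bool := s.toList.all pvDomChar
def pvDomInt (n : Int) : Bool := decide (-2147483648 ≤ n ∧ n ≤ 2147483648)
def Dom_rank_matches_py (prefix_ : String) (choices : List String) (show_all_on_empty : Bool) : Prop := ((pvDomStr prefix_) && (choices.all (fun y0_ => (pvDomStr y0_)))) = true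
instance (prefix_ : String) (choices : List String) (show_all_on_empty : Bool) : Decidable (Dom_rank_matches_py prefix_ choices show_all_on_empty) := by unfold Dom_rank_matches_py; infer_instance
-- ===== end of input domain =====

-- B replaces A's two staged filtering passes (the second with a per-element membership scan)
-- by one subsequence filter followed by a stable sort on a 0/1 key; return value only.

-- ===== PORT A =====
-- 'ch in it' on an iterator: consume until ch is found, returning the remaining iterator (none = exhausted)
def pvScanA : List Char → Char → Option (List Char)
  | [], _ => none
  | c :: cs, ch => if c == ch then some cs else pvScanA cs ch

-- all(ch in it for ch in query)
def pvAllInA : List Char → List Char → Bool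
  | [], _ => true
  | ch :: qs, it =>
    match pvScanA it ch with
    | none => false
    | some it' => pvAllInA qs it'

-- _is_fuzzy_match(query, candidate)
def is_fuzzy_match_py (query : String) (candidate : String) : Bool :=
  if query == "" then true
  else pvAllInA query.toList candidate.toList

def rank_matches_py (prefix_ : String) (choices : List String) (show_all_on_empty : Bool) : List String :=
  let pre := PySem.Str.lower prefix_
  let choices_list := choices
  if pre == "" && show_all_on_empty then choices_list
  else
    let prefix_matches := choices_list.filter (fun c => PySem.Str.startswith (PySem.Str.lower c) pre)
    let fuzzy_matches := choices_list.filter (fun c => !(prefix_matches.contains c) && is_fuzzy_match_py pre (PySem.Str.lower c))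
    prefix_matches ++ fuzzy_matches

-- ===== PORT B =====
-- _is_subseq's loop: pos = candidate.find(ch, pos) + 1; if pos == 0: return False
def pvSubseqLoop : List Char → String → Int → Bool
  | [], _, _ => true
  | ch :: qs, cand, pos =>
    let pos' := PySem.Str.findFrom cand (String.ofList [ch]) pos + 1
    if pos' = 0 then false else pvSubseqLoop qs cand pos'

-- _is_subseq(query, candidate)
def is_subseq_py (query : String) (candidate : String) : Bool :=
  pvSubseqLoop query.toList candidate 0

def rank_matches_py_alt (prefix_ : String) (choices : List String) (show_all_on_empty : Bool) : List String :=
  let pre := PySem.Str.lower prefix_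
  let choices_list := choices
  if pre == "" && show_all_on_empty then choices_list
  else
    let matched := choices_list.filter (fun c => is_subseq_py pre (PySem.Str.lower c))
    PySem.List.sorted matched (fun c => if PySem.Str.startswith (PySem.Str.lower c) pre then (0 : Int) else 1) false

-- ===== PRECONDITION & SPEC =====
def Spec_rank_matches_py (prefix_ : String) (choices : List String) (show_all_on_empty : Bool) (out : List String) : Prop := out = rank_matches_py_alt prefix_ choices show_all_on_empty
instance (prefix_ : String) (choices : List String) (show_all_on_empty : Bool) (out : List String) : Decidable (Spec_rank_matches_py prefix_ choices show_all_on_empty out) := by unfold Spec_rank_matches_py; infer_instance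

-- ===== CLAIM (what is proved, stated in full; the proofs are below) =====
def Claim_equal_rank_matches_py : Prop := ∀ (prefix_ : String) (choices : List String) (show_all_on_empty : Bool), Dom_rank_matches_py prefix_ choices show_all_on_empty → Spec_rank_matches_py prefix_ choices show_all_on_empty (rank_matches_py prefix_ choices show_all_on_empty)

-- ===== LEMMAS AND PROOFS =====

-- [ch] is an infix of l iff ch occurs in l
theorem singleton_infix_iff (ch : Char) (l : List Char) : [ch] <:+: l ↔ ch ∈ l := by
  constructor
  · rintro ⟨a, b, rfl⟩; simp
  · intro h
    rcases List.append_of_mem h with ⟨a, b, rfl⟩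
    exact ⟨a, b, by simp⟩

-- A's iterator scan fails exactly when ch is absent
theorem scanA_none (ch : Char) : ∀ l : List Char, ch ∉ l → pvScanA l ch = none := by
  intro l
  induction l with
  | nil => intro _; rfl
  | cons c cs ih =>
    intro h
    have hne : (c == ch) = false := by simp; rintro rfl; exact h (List.mem_cons_self)
    simpa [pvScanA, hne] using ih (fun hm => h (List.mem_cons_of_mem _ hm))

-- A's iterator scan at the first occurrence j of ch returns the suffix after j
theorem scanA_eq (ch : Char) : ∀ (l : List Char) (j : Nat),
    [ch] <+: l.drop j → (∀ i < j, ¬ [ch] <+: l.drop i) → pvScanA l ch = some (l.drop (j + 1)) := by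
  intro l
  induction l with
  | nil =>
    intro j hj _
    simp at hj
  | cons c cs ih =>
    intro j hj hmin
    cases j with
    | zero =>
      rcases hj with ⟨t, ht⟩
      simp at ht
      simp [pvScanA, ht.1]
    | succ j' =>
      have hc : (c == ch) = false := by
        simp
        rintro rfl
        exact hmin 0 (Nat.succ_pos _) ⟨cs, rfl⟩
      have := ih j' (by simpa using hj) (fun i hi => by simpa using hmin (i + 1) (by omega))
      simpa [pvScanA, hc] using this

-- B's find-driven loop at offset k equals A's scan over the suffix from k
theorem subseqLoop_eq_allInA (cand : String) : ∀ (q : List Char) (k : Nat), k ≤ cand.toList.length →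
    pvSubseqLoop q cand (k : Int) = pvAllInA q (cand.toList.drop k) := by
  intro q
  induction q with
  | nil => intro k _; rfl
  | cons ch qs ih =>
    intro k hk
    have hfind : PySem.Chars.findFrom cand.toList [ch] (k : Int) =
        if PySem.Chars.find (cand.toList.drop k) [ch] = -1 then -1
        else (k : Int) + PySem.Chars.find (cand.toList.drop k) [ch] :=
      PySem.Chars.findFrom_natCast cand.toList [ch] k hk
    by_cases habs : PySem.Chars.find (cand.toList.drop k) [ch] = -1
    · have hnot : ch ∉ cand.toList.drop k := by
        have := (PySem.Chars.find_eq_neg_one_iff (s := cand.toList.drop k) (sub := [ch])).mp habs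
        exact fun hm => this ((singleton_infix_iff ch _).mpr hm)
      rw [if_pos habs] at hfind
      simp [pvSubseqLoop, pvAllInA, PySem.Str.findFrom_eq, String.toList_ofList, hfind,
        scanA_none ch _ hnot]
    · have hpos : 0 ≤ PySem.Chars.find (cand.toList.drop k) [ch] := by
        have := PySem.Chars.neg_one_le_find (s := cand.toList.drop k) (sub := [ch])
        omega
      obtain ⟨i, hi⟩ : ∃ i : Nat, PySem.Chars.find (cand.toList.drop k) [ch] = (i : Int) :=
        ⟨(PySem.Chars.find (cand.toList.drop k) [ch]).toNat, (Int.toNat_of_nonneg hpos).symm⟩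
      obtain ⟨hpre, hmin⟩ := PySem.Chars.find_spec (s := cand.toList.drop k) (sub := [ch]) hpos
      rw [hi] at hpre hmin
      simp only [Int.toNat_natCast] at hpre hmin
      -- the found position lies inside the suffix
      have hlt : k + i < cand.toList.length := by
        rcases hpre with ⟨t, ht⟩
        have hne : (cand.toList.drop k).drop i ≠ [] := by
          intro hnil; rw [hnil] at ht; simp at ht
        have hpos' := List.length_pos_of_ne_nil hne
        rw [List.length_drop, List.length_drop] at hpos'
        omega
      have hscan : pvScanA (cand.toList.drop k) ch = some ((cand.toList.drop k).drop (i + 1)) :=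
        scanA_eq ch _ i hpre (fun j hj => hmin j hj)
      rw [if_neg habs, hi] at hfind
      have hval : PySem.Chars.findFrom cand.toList [ch] (k : Int) + 1 = ((k + i + 1 : Nat) : Int) := by
        rw [hfind]; push_cast; ring
      have hrec := ih (k + i + 1) (by omega)
      have hdrop : (cand.toList.drop k).drop (i + 1) = cand.toList.drop (k + i + 1) := by
        rw [List.drop_drop]; ring_nf
      simp only [pvSubseqLoop, pvAllInA, PySem.Str.findFrom_eq, String.toList_ofList, hval,
        hscan, hdrop, hrec]
      rw [if_neg (by omega)]

-- the two fuzzy tests agree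
theorem fuzzy_eq (q c : String) : is_fuzzy_match_py q c = is_subseq_py q c := by
  unfold is_fuzzy_match_py is_subseq_py
  by_cases hq : q = ""
  · subst hq; rfl
  · have h0 := subseqLoop_eq_allInA c q.toList 0 (Nat.zero_le _)
    simp at h0
    simp [hq, h0]

-- a prefix match is a fuzzy match (A's test succeeds on any extension of the query)
theorem allInA_prefix : ∀ (q r : List Char), pvAllInA q (q ++ r) = true := by
  intro q
  induction q with
  | nil => intro r; rfl
  | cons ch qs ih => intro r; simpa [pvAllInA, pvScanA] using ih r

theorem startswith_fuzzy (pre c : String) :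
    PySem.Str.startswith c pre = true → is_fuzzy_match_py pre c = true := by
  intro h
  have hp : pre.toList <+: c.toList := by
    have := PySem.Chars.startswith_iff (s := c.toList) (p := pre.toList)
    simp at h
    exact this.mp h
  rcases hp with ⟨t, ht⟩
  unfold is_fuzzy_match_py
  by_cases hq : pre = ""
  · simp [hq]
  · simpa [hq, ← ht] using allInA_prefix pre.toList t

-- membership in a filtered list, for an element of the base list
theorem contains_filter_of_mem (l : List String) (p : String → Bool) (c : String) (hc : c ∈ l) :
    (l.filter p).contains c = p c := by
  by_cases h : p c = true
  · simp [List.mem_filter, hc, h]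
  · simp only [Bool.not_eq_true] at h
    simp [List.mem_filter, h]

-- inserting a 0-keyed element into (zeros ++ ones) puts it at the end of the zeros
theorem insertBy_zero (key : String → Int) (x : String) (hx : key x = 0) :
    ∀ (A0 A1 : List String), (∀ y ∈ A0, key y = 0) → (∀ y ∈ A1, key y = 1) →
      PySem.List.insertBy (fun a b => decide (key a < key b)) x (A0 ++ A1) = (A0 ++ [x]) ++ A1 := by
  intro A0
  induction A0 with
  | nil =>
    intro A1 _ h1
    cases A1 with
    | nil => simp [PySem.List.insertBy]
    | cons y ys =>
      have : key y = 1 := h1 y List.mem_cons_self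
      simp [PySem.List.insertBy, hx, this]
  | cons z zs ih =>
    intro A1 h0 h1
    have hz : key z = 0 := h0 z List.mem_cons_self
    simp only [List.cons_append, PySem.List.insertBy, hx, hz]
    rw [if_neg (by simp)]
    simp [ih A1 (fun y hy => h0 y (List.mem_cons_of_mem _ hy)) h1]

-- the insertion-sort fold with a 0/1 key is the stable partition
theorem foldl_insert_partition (p : String → Bool) :
    ∀ (xs A0 A1 : List String), (∀ y ∈ A0, p y = true) → (∀ y ∈ A1, p y = false) →
      xs.foldl (fun acc x => PySem.List.insertBy
          (fun a b => decide ((if p a then (0 : Int) else 1) < (if p b then (0 : Int) else 1))) x acc)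
        (A0 ++ A1)
      = (A0 ++ xs.filter p) ++ (A1 ++ xs.filter (fun c => !p c)) := by
  intro xs
  induction xs with
  | nil => intro A0 A1 _ _; simp
  | cons x xs ih =>
    intro A0 A1 h0 h1
    simp only [List.foldl_cons, List.filter_cons]
    by_cases hp : p x = true
    · rw [insertBy_zero (fun c => if p c then (0 : Int) else 1) x (by simp [hp]) A0 A1
        (fun y hy => by simp [h0 y hy]) (fun y hy => by simp [h1 y hy])]
      have hih := ih (A0 ++ [x]) A1
        (fun y hy => by rcases List.mem_append.mp hy with h | h; exact h0 y h; simp at h; subst h; exact hp) h1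
      rw [hih]
      simp [hp]
    · simp only [Bool.not_eq_true] at hp
      rw [PySem.List.insertBy_of_forall_not_before _ x (A0 ++ A1)
        (by intro y _; by_cases hy : p y = true <;> simp [hp, hy]), List.append_assoc]
      have hih := ih A0 (A1 ++ [x]) h0
        (fun y hy => by rcases List.mem_append.mp hy with h | h; exact h1 y h; simp at h; subst h; exact hp)
      rw [hih]
      simp [hp]

-- ===== VERDICT (by name: the statement is the Claim_ definition above) =====
theorem rank_matches_py_spec : Claim_equal_rank_matches_py := by
  intro prefix_ choices show_all_on_empty _
  unfold Spec_rank_matches_py rank_matches_py rank_matches_py_alt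
  set pre := PySem.Str.lower prefix_ with hpre
  by_cases hg : (pre == "" && show_all_on_empty) = true
  · simp [hg]
  · simp only [Bool.not_eq_true] at hg
    simp only [hg, Bool.false_eq_true, if_false]
    set p := fun c => PySem.Str.startswith (PySem.Str.lower c) pre with hp
    set f := fun c => is_subseq_py pre (PySem.Str.lower c) with hf
    have hpf : ∀ c, p c = true → f c = true := by
      intro c hc
      have := startswith_fuzzy pre (PySem.Str.lower c) hc
      rw [fuzzy_eq] at this
      exact this
    rw [PySem.List.sorted_eq_foldl_insertBy (choices.filter f) (fun c => if p c then (0 : Int) else 1)]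
    have hpart := foldl_insert_partition p (choices.filter f) [] [] (by simp) (by simp)
    simp only [List.nil_append] at hpart
    rw [hpart]
    simp only [List.filter_filter]
    have h1 : choices.filter (fun c => p c && f c) = choices.filter p := by
      apply List.filter_congr
      intro c _
      by_cases hc : p c = true
      · simp [hc, hpf c hc]
      · simp only [Bool.not_eq_true] at hc; simp [hc]
    have h2 : choices.filter (fun c => !(choices.filter p).contains c && is_fuzzy_match_py pre (PySem.Str.lower c))
        = choices.filter (fun c => !p c && f c) := by
      apply List.filter_congr
      intro c hc
      rw [contains_filter_of_mem choices p c hc, fuzzy_eq]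
    rw [h2, h1]
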